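-- pv_equiv track=rewrite | github.com/hillerlab/CESAR | CESAR/helpers.py | leading_intron_in_sequence
-- ===== SOURCE A (Python) =====
-- def leading_intron_in_sequence(s):
--     '''
--     function counts the number of intronic nt occuring at the start
--     of a sequence
--     '''
--     seq = s.strip()
--     l = 0
--     for i in seq:
--         if i in ['a', 'g', 'c', 't']:
--             l +=1
--         else:
--             break
--     return l
-- ===== SOURCE B (Python) =====
-- import re
--
-- def leading_intron_in_sequence(s):
--     return len(re.match(r'[agct]*', s.strip()).group())
-- ===== Notes on version B (the rewrite author's own statement) =====
-- stated objective: idiomatic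
-- what changed: Replaces the manual per-character loop with break and counter by a single regex prefix match len(re.match(r'[agct]*', s.strip()).group()).
import Mathlib
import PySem

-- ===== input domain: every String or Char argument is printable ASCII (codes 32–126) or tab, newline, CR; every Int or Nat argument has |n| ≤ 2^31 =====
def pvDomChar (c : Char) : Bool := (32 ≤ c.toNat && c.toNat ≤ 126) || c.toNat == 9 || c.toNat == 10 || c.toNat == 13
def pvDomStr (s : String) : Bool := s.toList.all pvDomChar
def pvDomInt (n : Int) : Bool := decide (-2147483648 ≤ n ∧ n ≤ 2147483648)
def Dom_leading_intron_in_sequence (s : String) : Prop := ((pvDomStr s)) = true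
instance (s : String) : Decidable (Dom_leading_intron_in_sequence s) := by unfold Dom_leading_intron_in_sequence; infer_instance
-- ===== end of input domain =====

-- B replaces A's explicit counting loop with break by one regex prefix match ([agct]*); idiomatic, same cost.

-- ===== PORT A =====
-- the for-loop with break and counter l
def pvLoopA : List Char → Int → Int
  | [], l => l
  | c :: cs, l => if c = 'a' ∨ c = 'g' ∨ c = 'c' ∨ c = 't' then pvLoopA cs (l + 1) else l

def leading_intron_in_sequence (s : String) : Int :=
  pvLoopA (PySem.Str.strip s).toList 0

-- ===== PORT B =====
-- re.match(r'[agct]*', seq).group() is the maximal prefix of characters in {a,g,c,t}: takeWhile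
def leading_intron_in_sequence_alt (s : String) : Int :=
  ((PySem.Str.strip s).toList.takeWhile (fun c => c = 'a' ∨ c = 'g' ∨ c = 'c' ∨ c = 't')).length

-- ===== PRECONDITION & SPEC =====
def Spec_leading_intron_in_sequence (s : String) (out : Int) : Prop := out = leading_intron_in_sequence_alt s
instance (s : String) (out : Int) : Decidable (Spec_leading_intron_in_sequence s out) := by unfold Spec_leading_intron_in_sequence; infer_instance

-- ===== CLAIM (what is proved, stated in full; the proofs are below) =====
def Claim_equal_leading_intron_in_sequence : Prop := ∀ (s : String), Dom_leading_intron_in_sequence s → Spec_leading_intron_in_sequence s (leading_intron_in_sequence s)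

-- ===== LEMMAS AND PROOFS =====
theorem pvLoopA_eq_takeWhile (cs : List Char) (l : Int) :
    pvLoopA cs l = l + ((cs.takeWhile (fun c => c = 'a' ∨ c = 'g' ∨ c = 'c' ∨ c = 't')).length : Int) := by
  induction cs generalizing l with
  | nil => simp [pvLoopA]
  | cons c cs ih =>
    by_cases h : c = 'a' ∨ c = 'g' ∨ c = 'c' ∨ c = 't' <;>
      simp [pvLoopA, List.takeWhile, h, ih] <;> ring

-- ===== VERDICT (by name: the statement is the Claim_ definition above) =====
theorem leading_intron_in_sequence_spec : Claim_equal_leading_intron_in_sequence := by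
  intro s _
  unfold Spec_leading_intron_in_sequence leading_intron_in_sequence leading_intron_in_sequence_alt
  rw [pvLoopA_eq_takeWhile]
  simp
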